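-- pv_equiv track=rewrite | github.com/Andreym89/pyBasic281122 | lesson_9_module.py | function_5
-- ===== SOURCE A (Python) =====
-- def function_5(my_str: str) -> list:
--     return_list = []
--     uniq_counter = 0
--     for i in range(0, len(my_str)):
--         uniq_counter = 0
--         for j in range(0, len(my_str)):
--             if my_str[i] == my_str[j]:
--                 uniq_counter += 1
--         if uniq_counter == 1:
--             return_list.append(my_str[i])
--     return return_list
-- ===== SOURCE B (Python) =====
-- def function_5(my_str: str) -> list:
--     counts = {}
--     for ch in my_str:
--         counts[ch] = counts.get(ch, 0) + 1
--     return [ch for ch, n in counts.items() if n == 1]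
-- ===== Notes on version B (the rewrite author's own statement) =====
-- stated objective: faster
-- what changed: Replaced the quadratic position-by-position re-count with a single frequency-table pass and a second pass over the table's distinct keys (insertion = first-occurrence order), selecting keys with count 1.
import Mathlib
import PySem

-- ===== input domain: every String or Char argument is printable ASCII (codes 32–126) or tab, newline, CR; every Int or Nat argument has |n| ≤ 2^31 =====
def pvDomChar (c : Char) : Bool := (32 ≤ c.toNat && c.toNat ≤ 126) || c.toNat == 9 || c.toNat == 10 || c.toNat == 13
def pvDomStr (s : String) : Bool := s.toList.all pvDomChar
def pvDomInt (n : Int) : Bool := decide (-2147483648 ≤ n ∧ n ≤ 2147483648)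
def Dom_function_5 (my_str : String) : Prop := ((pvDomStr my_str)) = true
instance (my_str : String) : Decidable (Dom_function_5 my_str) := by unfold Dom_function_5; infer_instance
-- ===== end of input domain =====

-- B replaces A's quadratic per-position re-scan with one frequency-table pass plus a pass over the
-- table's distinct keys (first-occurrence order); objective: faster.

-- ===== PORT A =====
-- for i in range(len(s)): re-count occurrences of s[i] by an inner scan over all j; append s[i] when
-- the count is 1.  Indices produced by pyRange are always in range, so pyGetD's default ' ' is never used.
def function_5 (my_str : String) : List String :=
  let cs := my_str.toList
  let n : Int := PySem.List.len cs
  (PySem.List.pyRange 0 n).foldl (fun return_list i =>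
    let uniq_counter : Int :=
      (PySem.List.pyRange 0 n).foldl (fun c j =>
        if PySem.List.pyGetD cs i ' ' = PySem.List.pyGetD cs j ' ' then c + 1 else c) 0
    if uniq_counter = 1 then return_list ++ [String.ofList [PySem.List.pyGetD cs i ' ']]
    else return_list) []

-- ===== PORT B =====
-- counts[ch] = counts.get(ch, 0) + 1 over the characters, then the comprehension over counts.items().
def function_5_alt (my_str : String) : List String :=
  let counts : PySem.Dict Char Int :=
    my_str.toList.foldl (fun d ch => d.insert ch (d.getD ch 0 + 1)) PySem.Dict.empty
  (counts.items.filter (fun p => p.2 == 1)).map (fun p => String.ofList [p.1])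

-- ===== PRECONDITION & SPEC =====
def Spec_function_5 (my_str : String) (out : List String) : Prop := out = function_5_alt my_str
instance (my_str : String) (out : List String) : Decidable (Spec_function_5 my_str out) := by unfold Spec_function_5; infer_instance

-- ===== CLAIM (what is proved, stated in full; the proofs are below) =====
def Claim_equal_function_5 : Prop := ∀ (my_str : String), Dom_function_5 my_str → Spec_function_5 my_str (function_5 my_str)

-- ===== LEMMAS AND PROOFS =====

-- Elements whose count in l is at most 1 are kept identically whether we filter l itself or its
-- ordered deduplication (first-occurrence order): the fact connecting the two traversal shapes.
theorem pv_filter_ofList {α : Type} [BEq α] [LawfulBEq α] (l : List α) (p : α → Bool)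
    (h : ∀ x, p x = true → l.count x ≤ 1) :
    (PySem.Set.ofList l).filter p = l.filter p := by
  induction l with
  | nil => simp [PySem.Set.ofList]
  | cons x xs ih =>
    rw [PySem.Set.ofList_cons]
    have hxs : ∀ y, p y = true → xs.count y ≤ 1 := by
      intro y hy
      have := h y hy
      by_cases hyx : y = x <;> simp [List.count_cons, hyx] at this ⊢ <;> omega
    by_cases hpx : p x = true
    · have hx1 : (x :: xs).count x ≤ 1 := h x hpx
      have hxnot : x ∉ xs := by
        simp at hx1
        exact (List.count_eq_zero.mp (by omega))
      have : (PySem.Set.ofList xs).discard x = PySem.Set.ofList xs := by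
        simp only [PySem.Set.discard]
        apply List.filter_eq_self.mpr
        intro a ha
        have : a ∈ xs := (PySem.Set.mem_ofList xs a).mp ha
        simp
        rintro rfl; exact hxnot this
      rw [List.filter_cons, this, ih hxs, List.filter_cons]
    · have : ((PySem.Set.ofList xs).discard x).filter p = (PySem.Set.ofList xs).filter p := by
        have hpx' : p x = false := by simpa using hpx
        simp only [PySem.Set.discard, List.filter_filter]
        apply List.filter_congr
        intro a _
        by_cases hax : a = x
        · subst hax; simp [hpx']
        · simp [hax]
      rw [List.filter_cons, this, ih hxs, List.filter_cons]

-- A computes the filter-by-count form directly over the character list.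
theorem pv_A_eq (my_str : String) :
    function_5 my_str =
      (my_str.toList.filter (fun c => my_str.toList.count c == 1)).map
        (fun c => String.ofList [c]) := by
  unfold function_5
  set cs := my_str.toList with hcs
  -- inner loop = count of cs[i] in cs
  have hinner : ∀ i : Int,
      (PySem.List.pyRange 0 (PySem.List.len cs)).foldl (fun c j =>
        if PySem.List.pyGetD cs i ' ' = PySem.List.pyGetD cs j ' ' then c + 1 else c) 0
      = (cs.count (PySem.List.pyGetD cs i ' ') : Int) := by
    intro i
    rw [PySem.List.foldl_ite_add_one]
    set a := PySem.List.pyGetD cs i ' ' with ha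
    have : List.countP (fun j => decide (a = PySem.List.pyGetD cs j ' '))
        (PySem.List.pyRange 0 (PySem.List.len cs))
        = List.countP (fun x => decide (a = x)) cs := by
      conv_rhs => rw [← PySem.List.map_pyGetD_pyRange_zero cs ' ']
      rw [List.countP_map]
      rfl
    rw [this, zero_add]
    norm_cast
    rw [List.count]
    exact List.countP_congr (fun x _ => by rw [beq_eq_decide]; simpa using eq_comm)
  rw [PySem.List.foldl_congr_mem (PySem.List.pyRange 0 (PySem.List.len cs)) _
      (fun return_list i =>
        if (cs.count (PySem.List.pyGetD cs i ' ') : Int) = 1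
        then return_list ++ [String.ofList [PySem.List.pyGetD cs i ' ']] else return_list) []
      (fun acc x _ => by simp only [hinner])]
  rw [PySem.List.foldl_append_ite]
  conv_rhs => rw [← PySem.List.map_pyGetD_pyRange_zero cs ' ']
  rw [List.filter_map, List.map_map]
  simp only [List.nil_append]
  congr 1
  apply List.filter_congr
  intro i _
  simp only [Function.comp_apply]
  rw [PySem.List.map_pyGetD_pyRange_zero]
  simp [beq_eq_decide]

-- B computes the same filter over the deduplicated key list.
theorem pv_B_eq (my_str : String) :
    function_5_alt my_str =
      ((PySem.Set.ofList my_str.toList).filter (fun c => my_str.toList.count c == 1)).map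
        (fun c => String.ofList [c]) := by
  unfold function_5_alt
  rw [PySem.Dict.foldl_insert_getD_add_one_eq_counter]
  show List.map (fun p => String.ofList [p.1]) (List.filter (fun p => p.2 == 1) (PySem.Dict.counter my_str.toList).items) = _
  rw [PySem.Dict.items_counter, List.filter_map, List.map_map]
  congr 1
  apply List.filter_congr
  intro c _
  simp

-- ===== VERDICT (by name: the statement is the Claim_ definition above) =====
theorem function_5_spec : Claim_equal_function_5 := by
  intro my_str _
  unfold Spec_function_5
  rw [pv_A_eq, pv_B_eq, pv_filter_ofList]
  intro x hx
  simp only [beq_iff_eq] at hx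
  omega
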